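-- pv_equiv track=rewrite | github.com/Helloworld616/algorithm | Programmers/코딩테스트 고득점 Kit/해시/3_위장/sol1.py | solution
-- ===== SOURCE A (Python) =====
-- def solution(clothes):
--     closet = dict()
--     for cloth in clothes:
--         if cloth[1] in closet:
--             closet[cloth[1]] += 1
--         else:
--             closet[cloth[1]] = 1
--
--     num_list = []
--     for num in closet.values():
--         num_list.append(num)
--
--     answer = sum(num_list)
--     for i in range(len(num_list)-1):
--         for j in range(i+1, len(num_list)):
--             answer += num_list[i] * num_list[j]
--
--     return answer
-- ===== SOURCE B (Python) =====
-- def solution(clothes):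
--     counts = {}
--     for cloth in clothes:
--         kind = cloth[1]
--         counts[kind] = counts.get(kind, 0) + 1
--     total = 0
--     squares = 0
--     for n in counts.values():
--         total += n
--         squares += n * n
--     return total + (total * total - squares) // 2
-- ===== Notes on version B (the rewrite author's own statement) =====
-- stated objective: alternative
-- what changed: Replaces the nested loop that sums pairwise products of the category counts by the closed form sum_{i<j} n_i*n_j = (S^2 - sum n_i^2)/2, computed in one pass together with the sum.
import Mathlib
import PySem

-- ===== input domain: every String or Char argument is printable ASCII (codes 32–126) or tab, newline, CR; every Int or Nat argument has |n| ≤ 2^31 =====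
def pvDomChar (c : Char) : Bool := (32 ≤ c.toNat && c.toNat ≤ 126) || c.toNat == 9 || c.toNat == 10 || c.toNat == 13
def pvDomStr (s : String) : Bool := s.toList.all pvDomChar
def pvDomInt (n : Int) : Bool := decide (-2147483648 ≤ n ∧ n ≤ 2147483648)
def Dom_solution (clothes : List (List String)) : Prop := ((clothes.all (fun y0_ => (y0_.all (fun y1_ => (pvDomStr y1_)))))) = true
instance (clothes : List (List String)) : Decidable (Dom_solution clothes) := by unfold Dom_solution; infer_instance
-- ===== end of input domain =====

-- B replaces A's nested pairwise-product loop by the one-pass closed form (S^2 - sum of squares)/2 (alternative algorithm).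
-- ===== PORT A =====
def solution (clothes : List (List String)) : Int :=
  let closet := clothes.foldl (fun d cloth =>
      let k := (PySem.List.pyGet? cloth 1).getD ""
      if d.contains k then d.insert k (d.getD k 0 + 1) else d.insert k 1)
    (PySem.Dict.empty : PySem.Dict String Int)
  let numList := closet.values.foldl (fun acc num => acc ++ [num]) []
  let answer := numList.sum
  (PySem.List.pyRange 0 ((numList.length : Int) - 1) 1).foldl (fun acc i =>
    (PySem.List.pyRange (i + 1) (numList.length : Int) 1).foldl (fun acc j =>
      acc + PySem.List.pyGetD numList i 0 * PySem.List.pyGetD numList j 0) acc) answer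

-- ===== PORT B =====
def solution_alt (clothes : List (List String)) : Int :=
  let counts := clothes.foldl (fun d cloth =>
      let kind := (PySem.List.pyGet? cloth 1).getD ""
      d.insert kind (d.getD kind 0 + 1))
    (PySem.Dict.empty : PySem.Dict String Int)
  let p := counts.values.foldl (fun p n => (p.1 + n, p.2 + n * n)) ((0 : Int), (0 : Int))
  p.1 + PySem.Int.floordiv (p.1 * p.1 - p.2) 2

-- ===== PRECONDITION & SPEC =====
-- Pre_ excludes exactly the inputs where Python's cloth[1] raises IndexError (a cloth with fewer than 2 entries).
def Pre_solution (clothes : List (List String)) : Prop := ∀ c ∈ clothes, 2 ≤ c.length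
instance (clothes : List (List String)) : Decidable (Pre_solution clothes) := by unfold Pre_solution; infer_instance
def pvWitness_solution : List (List String) := [["yellow_hat", "headgear"], ["blue_sunglasses", "eyewear"], ["green_turban", "headgear"]]

def Spec_solution (clothes : List (List String)) (out : Int) : Prop := out = solution_alt clothes
instance (clothes : List (List String)) (out : Int) : Decidable (Spec_solution clothes out) := by unfold Spec_solution; infer_instance

-- ===== CLAIM (what is proved, stated in full; the proofs are below) =====
def Claim_equal_solution : Prop := ∀ (clothes : List (List String)), Dom_solution clothes → Pre_solution clothes → Spec_solution clothes (solution clothes)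

-- ===== LEMMAS AND PROOFS =====

-- Σ_{i<j} l[i]*l[j], structurally
def pairSum : List Int → Int
  | [] => 0
  | a :: t => a * t.sum + pairSum t

lemma foldl_add_mul (c : Int) (xs : List Int) (init : Int) :
    xs.foldl (fun acc v => acc + c * v) init = init + c * xs.sum := by
  induction xs generalizing init with
  | nil => simp
  | cons a t ih => rw [List.foldl_cons, ih, List.sum_cons]; ring

-- the inner j-loop of A adds l[i] * sum(l[i+1:])
lemma inner_loop (l : List Int) (c init : Int) (i : Int) (hi : 0 ≤ i + 1) :
    (PySem.List.pyRange (i + 1) (l.length : Int) 1).foldl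
      (fun acc j => acc + c * PySem.List.pyGetD l j 0) init
    = init + c * (l.drop (i + 1).toNat).sum := by
  rw [PySem.List.foldl_pyRange_pyGetD' l 0 (fun acc v => acc + c * v) init hi]
  exact foldl_add_mul c _ init

lemma sum_contrib (l : List Int) :
    ((List.range (l.length - 1)).map
        (fun k => l.getD k 0 * (l.drop (k + 1)).sum)).sum = pairSum l := by
  induction l with
  | nil => simp [pairSum]
  | cons a t ih =>
    cases t with
    | nil => simp [pairSum]
    | cons b t' =>
      rw [show (a :: b :: t').length - 1 = (b :: t').length - 1 + 1 by simp,
          List.range_succ_eq_map]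
      simp only [List.map_cons, List.map_map, List.sum_cons, Function.comp_def]
      rw [show ((List.range ((b :: t').length - 1)).map
            (fun k => (a :: b :: t').getD (k + 1) 0 * ((a :: b :: t').drop (k + 1 + 1)).sum))
          = ((List.range ((b :: t').length - 1)).map
            (fun k => (b :: t').getD k 0 * ((b :: t').drop (k + 1)).sum)) from
          List.map_congr_left (fun k _ => by simp), ih]
      simp [pairSum]

-- the whole nested loop of A adds pairSum
lemma outer_loop (l : List Int) (init : Int) :
    (PySem.List.pyRange 0 ((l.length : Int) - 1) 1).foldl (fun acc i =>
      (PySem.List.pyRange (i + 1) (l.length : Int) 1).foldl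
        (fun acc j => acc + PySem.List.pyGetD l i 0 * PySem.List.pyGetD l j 0) acc) init
    = init + pairSum l := by
  rw [PySem.List.foldl_congr_mem _ _
        (fun acc i => acc + PySem.List.pyGetD l i 0 * (l.drop (i + 1).toNat).sum) init
        (fun acc i hi => inner_loop l _ acc i
          (by have := (PySem.List.mem_pyRange_one.mp hi).1; omega)),
      PySem.List.foldl_add, ← sum_contrib l]
  congr 1
  rw [PySem.List.pyRange_one, List.map_map]
  refine congrArg List.sum ?_
  rw [show ((l.length : Int) - 1 - 0).toNat = l.length - 1 by omega]
  exact List.map_congr_left (fun k hk => by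
    have hk' : k < l.length - 1 := List.mem_range.mp hk
    simp only [Function.comp_def, zero_add, PySem.List.pyGetD_natCast]
    rw [show ((k : Int) + 1).toNat = k + 1 by omega])

lemma sq_pairSum (l : List Int) :
    l.sum * l.sum - (l.map (fun n => n * n)).sum = 2 * pairSum l := by
  induction l with
  | nil => simp [pairSum]
  | cons a t ih => simp only [List.sum_cons, List.map_cons, pairSum]; nlinarith [ih]

lemma final_arith (ns : List Int) :
    ns.sum + pairSum ns
    = (ns.foldl (fun p n => (p.1 + n, p.2 + n * n)) ((0 : Int), (0 : Int))).1
      + PySem.Int.floordiv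
          ((ns.foldl (fun p n => (p.1 + n, p.2 + n * n)) ((0 : Int), (0 : Int))).1
            * (ns.foldl (fun p n => (p.1 + n, p.2 + n * n)) ((0 : Int), (0 : Int))).1
            - (ns.foldl (fun p n => (p.1 + n, p.2 + n * n)) ((0 : Int), (0 : Int))).2) 2 := by
  rw [PySem.List.foldl_prod_mk (fun s n => s + n) (fun q n => q + n * n) ns 0 0]
  simp only
  rw [show List.foldl (fun s n => s + n) 0 ns = ns.sum from
        by simpa using PySem.List.foldl_add ns id 0,
      show List.foldl (fun q n => q + n * n) 0 ns = (ns.map (fun n => n * n)).sum from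
        by simpa using PySem.List.foldl_add ns (fun n => n * n) 0,
      PySem.Int.floordiv_eq_ediv_of_pos (by norm_num : (0 : Int) < 2), sq_pairSum ns]
  omega

lemma dict_steps_eq :
    (fun (d : PySem.Dict String Int) (cloth : List String) =>
      let k := (PySem.List.pyGet? cloth 1).getD ""
      if d.contains k then d.insert k (d.getD k 0 + 1) else d.insert k 1)
    = (fun (d : PySem.Dict String Int) (cloth : List String) =>
      let kind := (PySem.List.pyGet? cloth 1).getD ""
      d.insert kind (d.getD kind 0 + 1)) := by
  funext d cloth
  by_cases h : d.contains ((PySem.List.pyGet? cloth 1).getD "")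
  · simp [h]
  · simp only [h, if_neg, Bool.false_eq_true, not_false_eq_true]
    rw [PySem.Dict.getD_of_not_contains d 0 (by simpa using h)]
    norm_num

-- ===== VERDICT (by name: the statement is the Claim_ definition above) =====
theorem solution_spec : Claim_equal_solution := by
  intro clothes _ _
  unfold Spec_solution solution solution_alt
  rw [dict_steps_eq]
  simp only [PySem.List.foldl_append_singleton, List.nil_append]
  rw [outer_loop]
  exact final_arith _
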